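-- pv_equiv track=rewrite | github.com/upesacm/100DaysOfCode-2025 | Quiz_7/Pranvkumar_590011587/Quiz_7_Debugging_Question_1.py | is_queue_palindrome_fixed
-- ===== SOURCE A (Python) =====
-- def is_queue_palindrome_fixed(queue):
--     stack = []
--     temp_queue = queue.copy()
--     for elem in temp_queue:
--         stack.append(elem)
--
--     for elem in temp_queue:
--         if elem != stack.pop():
--             return False
--     return True
-- ===== SOURCE B (Python) =====
-- def is_queue_palindrome_fixed(queue):
--     # Two-pointer scan over the first half; no auxiliary stack, no draining.
--     seq = queue.copy()
--     n = len(seq)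
--     for i in range(n // 2):
--         if seq[i] != seq[n - 1 - i]:
--             return False
--     return True
-- ===== Notes on version B (the rewrite author's own statement) =====
-- stated objective: simpler
-- what changed: Replaces the build-a-stack-then-drain-it pass with a direct two-pointer comparison of seq[i] against seq[n-1-i] over the first half of the list, eliminating the auxiliary stack and half the comparisons.
import Mathlib
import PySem

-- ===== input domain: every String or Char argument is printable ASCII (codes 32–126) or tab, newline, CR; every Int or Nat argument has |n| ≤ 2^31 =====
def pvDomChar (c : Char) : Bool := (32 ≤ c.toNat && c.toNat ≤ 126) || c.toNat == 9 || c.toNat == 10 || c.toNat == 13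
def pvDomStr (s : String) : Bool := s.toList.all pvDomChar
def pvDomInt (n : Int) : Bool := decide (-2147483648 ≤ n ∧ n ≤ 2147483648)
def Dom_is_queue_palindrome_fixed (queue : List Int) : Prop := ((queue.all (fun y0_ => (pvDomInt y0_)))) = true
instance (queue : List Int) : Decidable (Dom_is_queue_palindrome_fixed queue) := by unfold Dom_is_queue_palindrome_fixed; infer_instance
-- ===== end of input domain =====

-- B replaces A's auxiliary stack (build + drain) by a two-pointer scan of the first half: simpler, no stack.


-- ===== PORT A =====
-- second loop of A: for elem in temp_queue: if elem != stack.pop(): return False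
def pvA_go : List Int → List Int → Bool
  | [], _ => true
  | e :: rest, stack =>
    match PySem.List.pop? stack with
    | none => false                 -- Python would raise IndexError; unreachable (stack starts as long as the queue)
    | some (top, stack') => if e ≠ top then false else pvA_go rest stack'

def is_queue_palindrome_fixed (queue : List Int) : Bool :=
  let temp_queue := queue
  let stack := temp_queue.foldl (fun s e => s ++ [e]) []   -- for elem in temp_queue: stack.append(elem)
  pvA_go temp_queue stack

-- ===== PORT B =====
-- two-pointer scan: for i in range(n // 2): if seq[i] != seq[n-1-i]: return False; return True
-- (indices are always in range here, so List.getD is exact for seq[i])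
def is_queue_palindrome_fixed_alt (queue : List Int) : Bool :=
  let seq := queue
  let n := seq.length
  (List.range (n / 2)).all (fun i => !(seq.getD i 0 != seq.getD (n - 1 - i) 0))

-- ===== PRECONDITION & SPEC =====
def Spec_is_queue_palindrome_fixed (queue : List Int) (out : Bool) : Prop := out = is_queue_palindrome_fixed_alt queue
instance (queue : List Int) (out : Bool) : Decidable (Spec_is_queue_palindrome_fixed queue out) := by unfold Spec_is_queue_palindrome_fixed; infer_instance

-- ===== CLAIM (what is proved, stated in full; the proofs are below) =====
def Claim_equal_is_queue_palindrome_fixed : Prop := ∀ (queue : List Int), Dom_is_queue_palindrome_fixed queue → Spec_is_queue_palindrome_fixed queue (is_queue_palindrome_fixed queue)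

-- ===== LEMMAS AND PROOFS =====
-- elementwise comparison of two lists, stopping early at the first mismatch (pvA_go with the stack reversed)
def pvCmp : List Int → List Int → Bool
  | [], _ => true
  | _ :: _, [] => false
  | e :: rest, t :: ts => if e ≠ t then false else pvCmp rest ts

theorem pvFoldlAppend (q acc : List Int) : q.foldl (fun s e => s ++ [e]) acc = acc ++ q := by
  induction q generalizing acc with
  | nil => simp [List.foldl]
  | cons x xs ih => simp [List.foldl, ih]

theorem pvA_go_eq_cmp (es st : List Int) : pvA_go es st = pvCmp es st.reverse := by
  induction es generalizing st with
  | nil => simp [pvA_go, pvCmp]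
  | cons e rest ih =>
    rcases st.eq_nil_or_concat with rfl | ⟨ys, y, rfl⟩
    · simp [pvA_go, pvCmp, PySem.List.pop?]
    · rw [List.concat_eq_append]
      simp only [pvA_go, PySem.List.pop?_last, List.reverse_append, List.reverse_cons,
        List.reverse_nil, List.nil_append, List.singleton_append, pvCmp]
      split_ifs with h
      · rfl
      · exact ih ys

theorem pvCmp_eq_decide (es rs : List Int) (h : es.length = rs.length) :
    pvCmp es rs = decide (es = rs) := by
  induction es generalizing rs with
  | nil => cases rs with
    | nil => simp [pvCmp]
    | cons t ts => simp at h
  | cons e rest ih =>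
    cases rs with
    | nil => simp at h
    | cons t ts =>
      simp only [pvCmp]
      split_ifs with hne
      · have hnc : ¬ (e :: rest = t :: ts) := fun hc => hne (by injection hc)
        simp [hnc]
      · push_neg at hne
        subst hne
        rw [ih ts (by simpa using h)]
        simp

theorem pvA_eq (q : List Int) : is_queue_palindrome_fixed q = decide (q = q.reverse) := by
  simp only [is_queue_palindrome_fixed]
  rw [pvFoldlAppend, List.nil_append, pvA_go_eq_cmp, pvCmp_eq_decide]
  simp

theorem pvB_eq (q : List Int) : is_queue_palindrome_fixed_alt q = decide (q = q.reverse) := by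
  simp only [is_queue_palindrome_fixed_alt]
  rw [Bool.eq_iff_iff]
  simp only [List.all_eq_true, List.mem_range, Bool.not_eq_eq_eq_not, Bool.not_true,
    bne_eq_false_iff_eq, decide_eq_true_iff]
  constructor
  · intro h
    apply List.ext_getElem (by simp)
    intro i h1 h2
    rw [List.getElem_reverse]
    by_cases hi : i < q.length / 2
    · have := h i hi
      rwa [List.getD_eq_getElem _ _ (by omega), List.getD_eq_getElem _ _ (by omega)] at this
    · by_cases hmid : i = q.length - 1 - i
      · congr 1
      · have hj : q.length - 1 - i < q.length / 2 := by omega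
        have := h _ hj
        rw [List.getD_eq_getElem _ _ (by omega), List.getD_eq_getElem _ _ (by omega)] at this
        have hrw : q.length - 1 - (q.length - 1 - i) = i := by omega
        simp only [hrw] at this
        exact this.symm
  · intro h i hi
    rw [List.getD_eq_getElem _ _ (by omega), List.getD_eq_getElem _ _ (by omega)]
    have hg := List.getElem_of_eq h (show i < q.length by omega)
    rwa [List.getElem_reverse] at hg

-- ===== VERDICT (by name: the statement is the Claim_ definition above) =====
theorem is_queue_palindrome_fixed_spec : Claim_equal_is_queue_palindrome_fixed := by
  intro q _
  unfold Spec_is_queue_palindrome_fixed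
  rw [pvA_eq, pvB_eq]
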